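-- pv_equiv track=rewrite | github.com/erosethan/Proyecto-Compiladores-2 | token.py | tokenIdentificador
-- ===== SOURCE A (Python) =====
-- def esDigito(char):
-- 	return '0' <= char <= '9'
--
-- def esIdValido(char):
-- 	if 'a' <= char <= 'z':
-- 		return True
-- 	if 'A' <= char <= 'Z':
-- 		return True
-- 	return char == '_'
--
-- def tokenIdentificador(expresion):
-- 	indice = 0
-- 	estado = 'I0'
--
-- 	while estado != 'I2':
-- 		sigEstado = 'I2'
-- 		char = expresion[indice]
--
-- 		if estado == 'I0':
-- 			if esIdValido(char):
-- 				sigEstado = 'I1'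
--
-- 		if estado == 'I1':
-- 			if esIdValido(char):
-- 				sigEstado = 'I1'
-- 			elif esDigito(char):
-- 				sigEstado = 'I1'
-- 			else:
-- 				return ('I', indice)
--
-- 		estado = sigEstado
-- 		indice += 1
--
-- 	return ('N', 1)
-- ===== SOURCE B (Python) =====
-- def esDigito(char):
-- 	return '0' <= char <= '9'
--
-- def esIdValido(char):
-- 	if 'a' <= char <= 'z':
-- 		return True
-- 	if 'A' <= char <= 'Z':
-- 		return True
-- 	return char == '_'
--
-- def tokenIdentificador(expresion):
-- 	if not esIdValido(expresion[0]):
-- 		return ('N', 1)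
-- 	indice = 1
-- 	while esIdValido(expresion[indice]) or esDigito(expresion[indice]):
-- 		indice += 1
-- 	return ('I', indice)
-- ===== Notes on version B (the rewrite author's own statement) =====
-- stated objective: simpler
-- what changed: Replaced the explicit two-state FSM (estado/sigEstado variables, one unified while loop) with a direct decomposition: a guard on the first character followed by a plain index-advancing while loop over identifier characters; indexing is kept so the same IndexError cases remain.
import Mathlib
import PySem

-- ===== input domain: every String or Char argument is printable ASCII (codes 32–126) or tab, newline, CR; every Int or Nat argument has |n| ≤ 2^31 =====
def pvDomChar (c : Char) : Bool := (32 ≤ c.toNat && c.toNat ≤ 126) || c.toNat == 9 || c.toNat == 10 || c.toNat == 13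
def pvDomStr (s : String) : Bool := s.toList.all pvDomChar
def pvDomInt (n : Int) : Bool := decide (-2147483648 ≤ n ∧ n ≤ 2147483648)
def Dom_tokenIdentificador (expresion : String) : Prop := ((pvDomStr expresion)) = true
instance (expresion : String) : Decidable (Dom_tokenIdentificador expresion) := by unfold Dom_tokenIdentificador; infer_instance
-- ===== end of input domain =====

-- B removes A's explicit two-state FSM: a guard on the first character plus a plain
-- index-advancing while loop (objective: simpler). Equivalence is on Pre_ (A returns there).

-- ===== PORT A =====
-- shared helpers of the module (used verbatim by both Pythons)
def esDigito (char : Char) : Bool := '0' ≤ char && char ≤ '9'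

def esIdValido (char : Char) : Bool :=
  if 'a' ≤ char && char ≤ 'z' then true
  else if 'A' ≤ char && char ≤ 'Z' then true
  else char == '_'

-- A's while loop; `indice` is always ≥ 0 in Python, so a Nat index with getElem? is exact
-- (none = IndexError; the none-branch value is a placeholder outside Pre_).
def tokenIdentificadorLoop (cs : List Char) (indice : Nat) (estado : String) : String × Int :=
  if estado = "I2" then ("N", 1)
  else
    match h : cs[indice]? with
    | none => ("A:IndexError", 0)  -- Python raises IndexError here; excluded by Pre_
    | some char =>
      let sigEstado : String := if estado = "I0" ∧ esIdValido char = true then "I1" else "I2"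
      if estado = "I1" then
        if esIdValido char then tokenIdentificadorLoop cs (indice + 1) "I1"
        else if esDigito char then tokenIdentificadorLoop cs (indice + 1) "I1"
        else ("I", (indice : Int))
      else tokenIdentificadorLoop cs (indice + 1) sigEstado
termination_by cs.length - indice
decreasing_by
  all_goals
    obtain ⟨hlt, -⟩ := List.getElem?_eq_some_iff.mp h
    omega

def tokenIdentificador (expresion : String) : String × Int :=
  tokenIdentificadorLoop expresion.toList 0 "I0"

-- ===== PORT B =====
-- B's while loop: advance while the current char is identifier-valid or a digit.
def tokenIdentificadorAltLoop (cs : List Char) (indice : Nat) : String × Int :=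
  match h : cs[indice]? with
  | none => ("B:IndexError", 0)  -- Python raises IndexError here; excluded by Pre_
  | some c =>
    if esIdValido c || esDigito c then tokenIdentificadorAltLoop cs (indice + 1)
    else ("I", (indice : Int))
termination_by cs.length - indice
decreasing_by
  obtain ⟨hlt, -⟩ := List.getElem?_eq_some_iff.mp h
  omega

def tokenIdentificador_alt (expresion : String) : String × Int :=
  match expresion.toList[0]? with
  | none => ("B:IndexError", 0)  -- expresion[0] raises IndexError on empty input; excluded by Pre_
  | some c =>
    if esIdValido c then tokenIdentificadorAltLoop expresion.toList 1
    else ("N", 1)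

-- ===== PRECONDITION & SPEC =====
-- Pre_ excludes exactly the inputs where Python A raises IndexError: the empty string, and
-- strings whose leading identifier runs to the end of the string with no terminating character.
def Pre_tokenIdentificador (expresion : String) : Prop :=
  expresion.toList ≠ [] ∧
    (esIdValido (expresion.toList.headD ' ') = true →
      (expresion.toList.drop 1).any (fun c => !(esIdValido c || esDigito c)) = true)
instance (expresion : String) : Decidable (Pre_tokenIdentificador expresion) := by
  unfold Pre_tokenIdentificador; infer_instance

def pvWitness_tokenIdentificador : String := "x1 "

def Spec_tokenIdentificador (expresion : String) (out : String × Int) : Prop := out = tokenIdentificador_alt expresion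
instance (expresion : String) (out : String × Int) : Decidable (Spec_tokenIdentificador expresion out) := by unfold Spec_tokenIdentificador; infer_instance

-- ===== CLAIM (what is proved, stated in full; the proofs are below) =====
def Claim_equal_tokenIdentificador : Prop := ∀ (expresion : String), Dom_tokenIdentificador expresion → Pre_tokenIdentificador expresion → Spec_tokenIdentificador expresion (tokenIdentificador expresion)

-- ===== LEMMAS AND PROOFS =====

-- On the I1 state, A's FSM loop and B's plain loop run in lockstep, provided a terminating
-- (non-id, non-digit) character remains ahead of the index.
lemma loopI1_eq (cs : List Char) :
    ∀ n indice, cs.length - indice ≤ n →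
      (cs.drop indice).any (fun c => !(esIdValido c || esDigito c)) = true →
      tokenIdentificadorLoop cs indice "I1" = tokenIdentificadorAltLoop cs indice := by
  intro n
  induction n with
  | zero =>
    intro i hle hany
    exfalso
    have hd : cs.drop i = [] := List.drop_eq_nil_of_le (by omega)
    simp [hd] at hany
  | succ n ih =>
    intro i hle hany
    cases h : cs[i]? with
    | none =>
      exfalso
      have : cs.length ≤ i := by
        by_contra hlt
        exact absurd h (by simp [List.getElem?_eq_getElem (by omega : i < cs.length)])
      have hd : cs.drop i = [] := List.drop_eq_nil_of_le this
      simp [hd] at hany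
    | some c =>
      obtain ⟨hlt, hc⟩ := List.getElem?_eq_some_iff.mp h
      have hdrop : cs.drop i = c :: cs.drop (i + 1) := by
        rw [List.drop_eq_getElem_cons hlt, hc]
      rw [hdrop] at hany
      simp only [List.any_cons, Bool.or_eq_true] at hany
      unfold tokenIdentificadorLoop tokenIdentificadorAltLoop
      rw [h]
      by_cases hid : esIdValido c = true
      · have hany' : (cs.drop (i + 1)).any (fun c => !(esIdValido c || esDigito c)) = true := by
          rcases hany with hbad | htail
          · simp [hid] at hbad
          · exact htail
        simp [hid, ih (i + 1) (by omega) hany']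
      · by_cases hdg : esDigito c = true
        · have hany' : (cs.drop (i + 1)).any (fun c => !(esIdValido c || esDigito c)) = true := by
            rcases hany with hbad | htail
            · simp [hdg] at hbad
            · exact htail
          simp [hid, hdg, ih (i + 1) (by omega) hany']
        · simp [hid, hdg]

-- ===== VERDICT (by name: the statement is the Claim_ definition above) =====
theorem tokenIdentificador_spec : Claim_equal_tokenIdentificador := by
  intro e _ hpre
  obtain ⟨hne, hterm⟩ := hpre
  show tokenIdentificador e = tokenIdentificador_alt e
  unfold tokenIdentificador tokenIdentificador_alt
  cases hcs : e.toList with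
  | nil => exact absurd hcs hne
  | cons c rest =>
    rw [tokenIdentificadorLoop]
    rw [if_neg (by decide : ¬("I0" : String) = "I2")]
    split
    · next h => simp at h
    · next char h =>
      simp only [List.getElem?_cons_zero, Option.some.injEq] at h
      subst h
      simp only [List.getElem?_cons_zero]
      rw [if_neg (by decide : ¬("I0" : String) = "I1")]
      by_cases hid : esIdValido c = true
      · have hany : rest.any (fun c => !(esIdValido c || esDigito c)) = true := by
          have := hterm (by rw [hcs]; simpa using hid)
          rw [hcs] at this; simpa using this
        rw [if_pos (by simp [hid]), if_pos hid]
        exact loopI1_eq (c :: rest) (c :: rest).length 1 (by omega) (by simpa using hany)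
      · rw [if_neg (by simp [hid]), if_neg hid]
        rw [tokenIdentificadorLoop]
        simp
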